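-- pv_equiv track=rewrite | github.com/yy34565/deeplearning1 | datasomth.py | bin_boundary_smoothing
-- ===== SOURCE A (Python) =====
-- def bin_boundary_smoothing(data, bin_depth):
--     smoothed_data = []
--     for i in range(0, len(data), bin_depth):
--         bin_data = data[i:i + bin_depth]
--         min_value = min(bin_data)
--         max_value = max(bin_data)
--         smoothed_data.extend([min_value] + [max_value] * (len(bin_data) - 1))
--     return smoothed_data
-- ===== SOURCE B (Python) =====
-- def bin_boundary_smoothing(data, bin_depth):
--     smoothed_data = []
--     count = 0
--     mn = mx = 0
--     for v in data:
--         if count == 0: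
--             mn = mx = v
--             count = 1
--         else:
--             if v < mn:
--                 mn = v
--             if v > mx:
--                 mx = v
--             count += 1
--         if count == bin_depth:
--             smoothed_data.append(mn)
--             smoothed_data.extend([mx] * (count - 1))
--             count = 0
--     if count:
--         smoothed_data.append(mn)
--         smoothed_data.extend([mx] * (count - 1))
--     return smoothed_data
-- ===== Notes on version B (the rewrite author's own statement) =====
-- stated objective: alternative
-- what changed: Replaces the slice-per-bin loop with two min()/max() library scans per bin by a single streaming pass over the data that maintains (count, min, max) state and flushes a bin when it fills; Pre_ excludes non-positive bin_depth, the unnatural domain where A raises ValueError (bin_depth == 0) or returns [] as an artefact of range's empty descending step (bin_depth < 0).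
-- outside the precondition, e.g. on bin_boundary_smoothing([1, 2], -1): A returns [], B returns [1, 2]; on bin_boundary_smoothing([1], 0): A raises ValueError, B returns [1]
import Mathlib
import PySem

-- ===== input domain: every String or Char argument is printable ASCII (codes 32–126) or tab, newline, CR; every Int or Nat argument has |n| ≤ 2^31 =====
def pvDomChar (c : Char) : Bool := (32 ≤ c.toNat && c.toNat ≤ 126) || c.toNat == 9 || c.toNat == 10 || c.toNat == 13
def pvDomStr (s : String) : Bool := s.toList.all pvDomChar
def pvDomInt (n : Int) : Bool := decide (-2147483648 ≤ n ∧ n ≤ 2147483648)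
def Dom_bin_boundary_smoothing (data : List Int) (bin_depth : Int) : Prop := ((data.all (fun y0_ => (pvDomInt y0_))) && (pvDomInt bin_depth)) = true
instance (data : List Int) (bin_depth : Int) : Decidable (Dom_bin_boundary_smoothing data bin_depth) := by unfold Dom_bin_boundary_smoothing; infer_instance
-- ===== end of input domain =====

-- B re-implements the bin min/max smoothing as a single streaming pass (count/min/max state, flush when a
-- bin fills) instead of A's slice-per-bin loop with separate min() and max() scans; same O(n) cost.

-- ===== PORT A =====
def bin_boundary_smoothing (data : List Int) (bin_depth : Int) : List Int :=
  (PySem.List.pyRange 0 (data.length : Int) bin_depth).foldl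
    (fun smoothed_data i =>
      let bin_data := PySem.List.slice data (some i) (some (i + bin_depth))
      match PySem.List.min? bin_data (fun y => y), PySem.List.max? bin_data (fun y => y) with
      | some min_value, some max_value =>
          smoothed_data ++ ([min_value] ++ List.replicate (bin_data.length - 1) max_value)
      | _, _ => smoothed_data)   -- unreachable: bins are nonempty whenever the range is (bin_depth ≥ 1)
    []

-- ===== PORT B =====
-- loop body of Source B's single for-loop (state: smoothed_data, count, mn, mx)
def bStep (bin_depth : Int) (s : List Int × Int × Int × Int) (v : Int) : List Int × Int × Int × Int :=
  let out := s.1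
  let count := s.2.1
  let mn := s.2.2.1
  let mx := s.2.2.2
  let count' := if count = 0 then 1 else count + 1
  let mn' := if count = 0 then v else if v < mn then v else mn
  let mx' := if count = 0 then v else if v > mx then v else mx
  if count' = bin_depth then
    (out ++ ([mn'] ++ List.replicate (count' - 1).toNat mx'), 0, mn', mx')
  else
    (out, count', mn', mx')

-- trailing 'if count:' flush of Source B
def bFinish (s : List Int × Int × Int × Int) : List Int :=
  if s.2.1 ≠ 0 then s.1 ++ ([s.2.2.1] ++ List.replicate (s.2.1 - 1).toNat s.2.2.2) else s.1

def bin_boundary_smoothing_alt (data : List Int) (bin_depth : Int) : List Int :=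
  bFinish (data.foldl (bStep bin_depth) ([], 0, 0, 0))

-- ===== PRECONDITION & SPEC =====
-- Pre_ restricts to positive bin_depth, the natural domain: A raises ValueError at bin_depth == 0 and
-- returns [] for any negative bin_depth (an artefact of range's empty descending step), values B does not match.
def Pre_bin_boundary_smoothing (data : List Int) (bin_depth : Int) : Prop := 1 ≤ bin_depth
instance (data : List Int) (bin_depth : Int) : Decidable (Pre_bin_boundary_smoothing data bin_depth) := by unfold Pre_bin_boundary_smoothing; infer_instance
def pvWitness_bin_boundary_smoothing : List Int × Int := ([1, 2, 3], 2)

def Spec_bin_boundary_smoothing (data : List Int) (bin_depth : Int) (out : List Int) : Prop := out = bin_boundary_smoothing_alt data bin_depth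
instance (data : List Int) (bin_depth : Int) (out : List Int) : Decidable (Spec_bin_boundary_smoothing data bin_depth out) := by unfold Spec_bin_boundary_smoothing; infer_instance

-- ===== CLAIM (what is proved, stated in full; the proofs are below) =====
def Claim_equal_bin_boundary_smoothing : Prop := ∀ (data : List Int) (bin_depth : Int), Dom_bin_boundary_smoothing data bin_depth → Pre_bin_boundary_smoothing data bin_depth → Spec_bin_boundary_smoothing data bin_depth (bin_boundary_smoothing data bin_depth)

-- ===== LEMMAS AND PROOFS =====

-- common reference shape: the data cut in bins of km1+1, each bin emitted as min :: max * (len-1)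
def binMin : List Int → Int
  | [] => 0
  | x :: t => t.foldl min x

def binMax : List Int → Int
  | [] => 0
  | x :: t => t.foldl max x

def binOut (l : List Int) : List Int := binMin l :: List.replicate (l.length - 1) (binMax l)

def chunks (km1 : Nat) : List Int → List Int
  | [] => []
  | d :: ds => binOut ((d :: ds).take (km1 + 1)) ++ chunks km1 (ds.drop km1)
termination_by l => l.length
decreasing_by simpa using Nat.lt_succ_of_le (List.length_drop_le km1 ds)

lemma pyRange_pos_cons (a b s : Int) (hs : 0 < s) (h : a < b) :
    PySem.List.pyRange a b s = a :: PySem.List.pyRange (a + s) b s := by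
  rw [PySem.List.pyRange_of_pos _ _ hs, PySem.List.pyRange_of_pos _ _ hs, if_pos h]
  have hn : ((b - a + s - 1) / s).toNat
      = (if a + s < b then ((b - (a + s) + s - 1) / s).toNat else 0) + 1 := by
    split_ifs with h2
    · have e1 : b - a + s - 1 = (b - (a + s) + s - 1) + 1 * s := by ring
      rw [e1, Int.add_mul_ediv_right _ _ (by omega)]
      have h0 : 0 ≤ (b - (a + s) + s - 1) / s := Int.ediv_nonneg (by omega) (by omega)
      omega
    · have h1 : (1 : Int) ≤ (b - a + s - 1) / s := by
        rw [Int.le_ediv_iff_mul_le hs]; omega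
      have h2' : (b - a + s - 1) / s < 2 := by
        rw [Int.ediv_lt_iff_lt_mul hs]; omega
      omega
  rw [hn, List.range_succ_eq_map]
  simp only [List.map_cons, List.map_map, Nat.cast_zero, mul_zero, add_zero]
  congr 1
  apply List.map_congr_left
  intro k _
  simp only [Function.comp_apply]
  push_cast
  ring

lemma pyRange_shift (a b s : Int) (hs : 0 < s) :
    PySem.List.pyRange (a + s) b s = (PySem.List.pyRange a (b - s) s).map (· + s) := by
  rw [PySem.List.pyRange_of_pos _ _ hs, PySem.List.pyRange_of_pos _ _ hs, List.map_map]
  have hc : (a + s < b) = (a < b - s) := by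
    simp only [eq_iff_iff]; omega
  simp only [hc]
  have hv : b - (a + s) + s - 1 = b - s - a + s - 1 := by ring
  rw [hv]
  apply List.map_congr_left
  intro k _
  simp only [Function.comp_apply]
  ring

-- ---- A-side ----

-- the bin emitted by A's loop at index i (body of the foldl, accumulator factored out)
def aG (data : List Int) (bd i : Int) : List Int :=
  let bin_data := PySem.List.slice data (some i) (some (i + bd))
  match PySem.List.min? bin_data (fun y => y), PySem.List.max? bin_data (fun y => y) with
  | some min_value, some max_value => [min_value] ++ List.replicate (bin_data.length - 1) max_value
  | _, _ => []

lemma A_flatMap (data : List Int) (bd : Int) :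
    bin_boundary_smoothing data bd
      = (PySem.List.pyRange 0 (data.length : Int) bd).flatMap (aG data bd) := by
  unfold bin_boundary_smoothing
  have hf : (fun (smoothed_data : List Int) (i : Int) =>
      let bin_data := PySem.List.slice data (some i) (some (i + bd))
      match PySem.List.min? bin_data (fun y => y), PySem.List.max? bin_data (fun y => y) with
      | some min_value, some max_value =>
          smoothed_data ++ ([min_value] ++ List.replicate (bin_data.length - 1) max_value)
      | _, _ => smoothed_data)
      = (fun (smoothed_data : List Int) (i : Int) => smoothed_data ++ aG data bd i) := by
    funext acc i
    simp only [aG]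
    cases h1 : PySem.List.min? (PySem.List.slice data (some i) (some (i + bd))) (fun y => y) with
    | none =>
        cases h2 : PySem.List.max? (PySem.List.slice data (some i) (some (i + bd))) (fun y => y) <;> simp
    | some mn =>
        cases h2 : PySem.List.max? (PySem.List.slice data (some i) (some (i + bd))) (fun y => y) <;> simp
  rw [hf, PySem.List.foldl_append_eq_flatMap]
  simp

lemma aG_nonempty_bin (data : List Int) (bd i : Int) (h : PySem.List.slice data (some i) (some (i + bd)) ≠ []) :
    aG data bd i = binOut (PySem.List.slice data (some i) (some (i + bd))) := by
  simp only [aG]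
  obtain ⟨x, t, hx⟩ := List.exists_cons_of_ne_nil h
  rw [hx, PySem.List.min?_id_cons, PySem.List.max?_id_cons]
  simp [binOut, binMin, binMax]

lemma aG_shift (data : List Int) (k i : Int) (hk : 0 < k) (hi : 0 ≤ i) :
    aG data k (i + k) = aG (data.drop k.toNat) k i := by
  have hbin : PySem.List.slice data (some (i + k)) (some (i + k + k))
      = PySem.List.slice (data.drop k.toNat) (some i) (some (i + k)) := by
    rw [PySem.List.slice_toNat _ (by omega) (by omega), PySem.List.slice_toNat _ hi (by omega)]
    rw [List.drop_drop]
    have e1 : k.toNat + i.toNat = (i + k).toNat := by omega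
    have e2 : (i + k + k).toNat - (i + k).toNat = (i + k).toNat - i.toNat := by omega
    rw [e1, e2]
  simp only [aG, hbin]

lemma pyRange_pos_nil (a b s : Int) (hs : 0 < s) (h : ¬ a < b) :
    PySem.List.pyRange a b s = [] := by
  rw [PySem.List.pyRange_of_pos _ _ hs, if_neg h]
  simp

lemma flatMap_congr_mem (l : List Int) (f g : Int → List Int) (h : ∀ x ∈ l, f x = g x) :
    l.flatMap f = l.flatMap g := by
  induction l with
  | nil => rfl
  | cons a t ih =>
      simp only [List.flatMap_cons, h a (by simp)]
      rw [ih (fun x hx => h x (by simp [hx]))]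

lemma A_eq_chunks_aux (km1 : Nat) : ∀ (n : Nat) (data : List Int), data.length ≤ n →
    bin_boundary_smoothing data ((km1 : Int) + 1) = chunks km1 data := by
  intro n
  induction n with
  | zero =>
      intro data h
      have hd : data = [] := List.length_eq_zero_iff.mp (by omega)
      subst hd
      rw [A_flatMap, pyRange_pos_nil 0 _ _ (by omega) (by simp)]
      simp [chunks]
  | succ n ih =>
      intro data hlen
      match data with
      | [] =>
          rw [A_flatMap, pyRange_pos_nil 0 _ _ (by omega) (by simp)]
          simp [chunks]
      | d :: ds =>
          have hKpos : (0 : Int) < (km1 : Int) + 1 := by omega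
          have hlt : (0 : Int) < (((d :: ds).length : Nat) : Int) := by
            simp only [List.length_cons]; omega
          rw [A_flatMap, pyRange_pos_cons 0 _ _ hKpos hlt, List.flatMap_cons,
              pyRange_shift 0 _ _ hKpos, List.flatMap_map]
          have hmem : ∀ i ∈ PySem.List.pyRange 0 ((((d :: ds).length : Nat) : Int) - ((km1 : Int) + 1)) ((km1 : Int) + 1),
              aG (d :: ds) ((km1 : Int) + 1) (i + ((km1 : Int) + 1))
                = aG ((d :: ds).drop ((km1 : Int) + 1).toNat) ((km1 : Int) + 1) i := by
            intro i hi
            have hmi := (PySem.List.mem_pyRange_iff_of_pos hKpos i).mp hi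
            exact aG_shift _ _ _ hKpos hmi.1
          rw [flatMap_congr_mem _ _ _ (by intro x hx; exact hmem x hx)]
          -- head bin
          have hbin : PySem.List.slice (d :: ds) (some (0 : Int)) (some (0 + ((km1 : Int) + 1)))
              = (d :: ds).take (km1 + 1) := by
            rw [PySem.List.slice_toNat _ le_rfl (by omega)]
            have : ((0 : Int) + ((km1 : Int) + 1)).toNat - (0 : Int).toNat = km1 + 1 := by omega
            rw [this]
            simp
          have hbin_ne : PySem.List.slice (d :: ds) (some (0 : Int)) (some (0 + ((km1 : Int) + 1))) ≠ [] := by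
            rw [hbin]
            simp
          rw [aG_nonempty_bin _ _ 0 hbin_ne, hbin]
          have hKt : (((km1 : Int) + 1)).toNat = km1 + 1 := by omega
          have hdrop : (d :: ds).drop (((km1 : Int) + 1)).toNat = ds.drop km1 := by
            rw [hKt]; simp
          rw [hdrop]
          -- tail
          have htail : (PySem.List.pyRange 0 ((((d :: ds).length : Nat) : Int) - ((km1 : Int) + 1)) ((km1 : Int) + 1)).flatMap
                (aG (ds.drop km1) ((km1 : Int) + 1)) = chunks km1 (ds.drop km1) := by
            by_cases hc : km1 ≤ ds.length
            · have hlen2 : (((ds.drop km1).length : Nat) : Int) = (((d :: ds).length : Nat) : Int) - ((km1 : Int) + 1) := by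
                simp only [List.length_drop, List.length_cons]; push_cast; omega
              rw [← hlen2, ← A_flatMap]
              refine ih _ ?_
              simp only [List.length_drop, List.length_cons] at *
              omega
            · have h1 : ds.drop km1 = [] := List.drop_eq_nil_of_le (by omega)
              have h2 : ¬ (0 : Int) < (((d :: ds).length : Nat) : Int) - ((km1 : Int) + 1) := by
                simp only [List.length_cons]; push_cast; omega
              rw [pyRange_pos_nil 0 _ _ hKpos h2, h1]
              simp [chunks]
          rw [htail]
          simp [chunks, binOut]

-- ---- B-side ----

lemma if_min (v mn : Int) : (if v < mn then v else mn) = min mn v := by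
  rw [min_def]; split_ifs <;> omega

lemma if_max (v mx : Int) : (if v > mx then v else mx) = max mx v := by
  rw [max_def]; split_ifs <;> omega

lemma B_loop (km1 : Nat) : ∀ (n : Nat) (rest : List Int), rest.length ≤ n →
    (∀ (out : List Int) (mn0 mx0 : Int),
        bFinish (rest.foldl (bStep ((km1 : Int) + 1)) (out, 0, mn0, mx0)) = out ++ chunks km1 rest)
    ∧ (∀ (c : Nat) (out : List Int) (mn mx : Int), 1 ≤ c → c ≤ km1 →
        bFinish (rest.foldl (bStep ((km1 : Int) + 1)) (out, (c : Int), mn, mx))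
          = out ++ ((rest.take (km1 + 1 - c)).foldl min mn
              :: List.replicate ((c - 1) + min rest.length (km1 + 1 - c)) ((rest.take (km1 + 1 - c)).foldl max mx))
            ++ chunks km1 (rest.drop (km1 + 1 - c))) := by
  intro n
  induction n with
  | zero =>
      intro rest hlen
      have hr : rest = [] := List.length_eq_zero_iff.mp (by omega)
      subst hr
      constructor
      · intro out mn0 mx0
        simp [bFinish, chunks]
      · intro c out mn mx hc1 hc2
        have hcz : ((c : Int)) ≠ 0 := by omega
        have hc0 : ¬ c = 0 := by omega
        have he : ((c : Int) - 1).toNat = c - 1 := by omega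
        simp [bFinish, chunks, he, hc0]
  | succ n ih =>
      intro rest hlen
      constructor
      · intro out mn0 mx0
        match rest with
        | [] => simp [bFinish, chunks]
        | v :: vs =>
            rw [List.foldl_cons]
            have hstep : bStep ((km1 : Int) + 1) (out, 0, mn0, mx0) v
                = if (1 : Int) = (km1 : Int) + 1
                  then (out ++ ([v] ++ List.replicate ((1 : Int) - 1).toNat v), 0, v, v)
                  else (out, 1, v, v) := by
              simp [bStep]
            by_cases hk0 : km1 = 0
            · subst hk0
              rw [hstep, if_pos (by norm_num)]
              rw [(ih vs (by simpa using Nat.lt_succ_iff.mp (by simpa using hlen))).1]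
              simp [chunks, binOut, binMin, binMax]
            · rw [hstep, if_neg (by omega)]
              have hins := (ih vs (by simpa using Nat.lt_succ_iff.mp (by simpa using hlen))).2 1 out v v le_rfl (by omega)
              push_cast at hins
              rw [hins]
              simp only [chunks, List.take_succ_cons, binOut, binMin,
                List.length_cons, List.length_take, Nat.add_sub_cancel, binMax]
              have hmm : min km1 vs.length = min vs.length km1 := Nat.min_comm _ _
              simp [hmm]
      · intro c out mn mx hc1 hc2
        match rest with
        | [] =>
            have hcz : ((c : Int)) ≠ 0 := by omega
            have hc0 : ¬ c = 0 := by omega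
            have he : ((c : Int) - 1).toNat = c - 1 := by omega
            simp [bFinish, chunks, he, hc0]
        | v :: vs =>
            rw [List.foldl_cons]
            have hcz : ¬ ((c : Int) = 0) := by omega
            have hc0 : ¬ c = 0 := by omega
            have hstep : bStep ((km1 : Int) + 1) (out, (c : Int), mn, mx) v
                = if (c : Int) + 1 = (km1 : Int) + 1
                  then (out ++ ([if v < mn then v else mn] ++ List.replicate ((c : Int) + 1 - 1).toNat (if v > mx then v else mx)), 0,
                        if v < mn then v else mn, if v > mx then v else mx)
                  else (out, (c : Int) + 1, if v < mn then v else mn, if v > mx then v else mx) := by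
              simp [bStep, hc0]
            by_cases hck : c = km1
            · subst hck
              rw [hstep, if_pos rfl]
              rw [(ih vs (by simpa using Nat.lt_succ_iff.mp (by simpa using hlen))).1]
              have h1 : c + 1 - c = 1 := by omega
              have h2 : ((c : Int) + 1 - 1).toNat = c := by omega
              have h3 : c - 1 + min ((vs.length) + 1) 1 = c := by omega
              simp only [h1, h2, List.take_succ_cons, List.take_zero, List.drop_succ_cons,
                List.drop_zero, List.length_cons, List.foldl_cons, List.foldl_nil, if_min, if_max, h3,
                List.append_assoc]
              simp
            · rw [hstep, if_neg (by omega)]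
              have hcast : ((c : Int)) + 1 = ((c + 1 : Nat) : Int) := by push_cast; ring
              rw [hcast]
              rw [(ih vs (by simpa using Nat.lt_succ_iff.mp (by simpa using hlen))).2 (c + 1) out _ _ (by omega) (by omega)]
              have e1 : km1 + 1 - (c + 1) = km1 - c := by omega
              have e2 : km1 + 1 - c = (km1 - c) + 1 := by omega
              have e3 : c - 1 + min ((vs.length) + 1) ((km1 - c) + 1) = c + 1 - 1 + min vs.length (km1 - c) := by omega
              simp only [e1, e2, List.take_succ_cons, List.drop_succ_cons, List.length_cons,
                List.foldl_cons, if_min, if_max, e3, List.append_assoc]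
  
lemma B_eq_chunks' (km1 : Nat) (data : List Int) :
    bin_boundary_smoothing_alt data ((km1 : Int) + 1) = chunks km1 data := by
  unfold bin_boundary_smoothing_alt
  rw [(B_loop km1 data.length data le_rfl).1 [] 0 0]
  simp

-- ===== VERDICT (by name: the statement is the Claim_ definition above) =====
theorem bin_boundary_smoothing_spec : Claim_equal_bin_boundary_smoothing := by
  intro data bd _ hpre
  unfold Spec_bin_boundary_smoothing
  simp only [Pre_bin_boundary_smoothing] at hpre
  have hk : bd = ((bd.toNat - 1 : Nat) : Int) + 1 := by omega
  rw [hk, A_eq_chunks_aux _ data.length data le_rfl, B_eq_chunks' ]
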